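-- pv_equiv track=rewrite | github.com/AM-ops/SecurityProject | Algorithms/algorithms.py | StrToMatrix_FILE
-- ===== SOURCE A (Python) =====
-- def StrToMatrix_FILE(text,key):
--     matrix = []
--     row = []
--     count = 0
--     length = len(text)
--     for item in text:
--         row.append(item)
--         count += 1
--         length -= 1
--         if(count == key):
--             matrix.append(row)
--             row = []
--             count = 0
--         elif(length == 0):
--             while(len(row)<key):
--                 row.append(item)
--             matrix.append(row)
--     return matrix
-- ===== SOURCE B (Python) =====
-- def StrToMatrix_FILE(text, key):
--     matrix = []
--     rest = text
--     while rest: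
--         matrix.append(list(rest[:key]))
--         rest = rest[key:]
--     if matrix:
--         last = matrix[-1]
--         while len(last) < key:
--             last.append(last[-1])
--     return matrix
-- ===== Notes on version B (the rewrite author's own statement) =====
-- stated objective: simpler
-- what changed: Replaces A's character-by-character pass with an inline counter and in-loop padding by whole-slice chunking (take key / drop key per iteration) followed by a separate pad-the-last-row post-pass.
-- outside the precondition, e.g. on StrToMatrix_FILE('ab', 0): A returns [['a', 'b']], B does not finish within the time limit
import Mathlib
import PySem

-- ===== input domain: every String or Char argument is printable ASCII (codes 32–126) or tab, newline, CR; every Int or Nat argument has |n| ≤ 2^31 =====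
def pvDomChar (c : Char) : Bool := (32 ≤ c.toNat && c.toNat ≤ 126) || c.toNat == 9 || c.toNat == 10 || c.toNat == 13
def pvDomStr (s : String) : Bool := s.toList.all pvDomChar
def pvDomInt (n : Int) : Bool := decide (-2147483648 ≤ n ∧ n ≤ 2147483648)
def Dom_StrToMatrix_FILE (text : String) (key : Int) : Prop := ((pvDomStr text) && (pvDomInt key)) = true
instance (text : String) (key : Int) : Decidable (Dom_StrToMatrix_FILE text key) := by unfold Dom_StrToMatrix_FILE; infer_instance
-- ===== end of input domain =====

-- B replaces A's char-by-char pass (inline counter + inline padding) by slice-based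
-- chunking with a separate pad-the-last-row post-pass; objective: simpler.


-- ===== PORT A =====
-- A's inner `while(len(row)<key): row.append(item)` (pads with the fixed char `item`)
def padWhileA (row : List String) (key : Int) (c : String) : List String :=
  if _h : (row.length : Int) < key then padWhileA (row ++ [c]) key c else row
termination_by (key - row.length).toNat
decreasing_by simp; omega

-- A's loop body: state = (matrix, row, count, length)
def stepA (key : Int) (st : List (List String) × List String × Int × Int) (item : Char) :
    List (List String) × List String × Int × Int :=
  let matrix := st.1
  let row := st.2.1 ++ [item.toString]
  let count := st.2.2.1 + 1
  let length := st.2.2.2 - 1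
  if count = key then (matrix ++ [row], ([] : List String), (0 : Int), length)
  else if length = 0 then
    let row := padWhileA row key item.toString
    (matrix ++ [row], row, count, length)
  else (matrix, row, count, length)

def StrToMatrix_FILE (text : String) (key : Int) : List (List String) :=
  (text.toList.foldl (stepA key) ([], [], 0, (text.toList.length : Int))).1

-- ===== PORT B =====
-- B's `while len(last) < key: last.append(last[-1])` (pads with the row's own last element)
def padB (row : List String) (key : Int) : List String :=
  if _h : (row.length : Int) < key then padB (row ++ [row.getLastD ""]) key else row
termination_by (key - row.length).toNat
decreasing_by simp; omega

-- B's `while rest: matrix.append(list(rest[:key])); rest = rest[key:]` with fuel = |rest|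
def chunkB (fuel : Nat) (rest : List String) (key : Int) : List (List String) :=
  match fuel with
  | 0 => []
  | fuel + 1 =>
    if rest = [] then []
    else PySem.List.slice rest (some 0) (some key) ::
         chunkB fuel (PySem.List.slice rest (some key) none) key

-- B's in-place mutation of the last row is rendered as dropLast ++ [padded last row]
def StrToMatrix_FILE_alt (text : String) (key : Int) : List (List String) :=
  let chars := text.toList.map (fun c => c.toString)
  let matrix := chunkB chars.length chars key
  match matrix.getLast? with
  | none => matrix
  | some last => matrix.dropLast ++ [padB last key]

-- ===== PRECONDITION & SPEC =====
-- Pre_ excludes nonempty text with key ≤ 0: A returns the whole text as one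
-- unpadded row there (its counter never fires), while B's slicing loop does not terminate.
def Pre_StrToMatrix_FILE (text : String) (key : Int) : Prop := text = "" ∨ 1 ≤ key
instance (text : String) (key : Int) : Decidable (Pre_StrToMatrix_FILE text key) := by
  unfold Pre_StrToMatrix_FILE; infer_instance

def pvWitness_StrToMatrix_FILE : String × Int := ("abcde", 3)

def Spec_StrToMatrix_FILE (text : String) (key : Int) (out : List (List String)) : Prop := out = StrToMatrix_FILE_alt text key
instance (text : String) (key : Int) (out : List (List String)) : Decidable (Spec_StrToMatrix_FILE text key out) := by unfold Spec_StrToMatrix_FILE; infer_instance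

-- ===== CLAIM (what is proved, stated in full; the proofs are below) =====
def Claim_equal_StrToMatrix_FILE : Prop := ∀ (text : String) (key : Int), Dom_StrToMatrix_FILE text key → Pre_StrToMatrix_FILE text key → Spec_StrToMatrix_FILE text key (StrToMatrix_FILE text key)

-- ===== LEMMAS AND PROOFS =====

-- characterisation of A's fold, one chunk at a time
def specF (row : List String) (cs : List Char) (key : Int) : List (List String) :=
  match cs with
  | [] => []
  | c :: rest =>
    let row' := row ++ [c.toString]
    if (row'.length : Int) = key then row' :: specF [] rest key
    else if rest = [] then [padWhileA row' key c.toString]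
    else specF row' rest key

lemma foldA_eq_specF (key : Int) :
    ∀ (cs : List Char) (matrix : List (List String)) (row : List String),
      (cs.foldl (stepA key) (matrix, row, (row.length : Int), (cs.length : Int))).1
        = matrix ++ specF row cs key := by
  intro cs
  induction cs with
  | nil => intro matrix row; simp [specF]
  | cons c rest ih =>
    intro matrix row
    rw [List.foldl_cons]
    by_cases hk : ((row.length : Int) + 1 = key)
    · have hstep : stepA key (matrix, row, (row.length : Int), ((c :: rest).length : Int)) c
          = (matrix ++ [row ++ [c.toString]], ([] : List String), (0 : Int), (rest.length : Int)) := by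
        simp only [stepA, hk, if_pos]
        have : (((c :: rest).length : Int) - 1) = (rest.length : Int) := by simp
        rw [this]
      rw [hstep]
      have hIH := ih (matrix ++ [row ++ [c.toString]]) []
      simp only [List.length_nil, Nat.cast_zero] at hIH
      rw [hIH]
      have hk' : (((row ++ [c.toString]).length : Int)) = key := by simp; omega
      rw [specF]
      simp only [hk', if_pos]
      simp
    · have hk0 : ¬ ((row.length : Int) + 1 = key) := hk
      have hk' : ¬ (((row ++ [c.toString]).length : Int)) = key := by simp; omega
      by_cases hr : rest = []
      · subst hr
        have hstep : stepA key (matrix, row, (row.length : Int), (([c] : List Char).length : Int)) c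
            = (matrix ++ [padWhileA (row ++ [c.toString]) key c.toString],
               padWhileA (row ++ [c.toString]) key c.toString, (row.length : Int) + 1, 0) := by
          simp only [stepA, List.length_cons, List.length_nil, Nat.cast_add, Nat.cast_one,
            Nat.cast_zero, zero_add]
          rw [if_neg hk0]
          norm_num
        rw [hstep]
        rw [specF]
        simp only [hk', if_neg, if_false, if_pos rfl]
        simp
      · have hstep : stepA key (matrix, row, (row.length : Int), ((c :: rest).length : Int)) c
            = (matrix, row ++ [c.toString], ((row ++ [c.toString]).length : Int), (rest.length : Int)) := by
          have hrl : 1 ≤ rest.length := List.length_pos_iff.mpr hr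
          simp only [stepA, List.length_cons, Nat.cast_add, Nat.cast_one, List.length_append,
            List.length_nil, zero_add]
          rw [if_neg hk0]
          rw [if_neg (by omega : ¬ ((rest.length : Int) + 1 - 1 = 0))]
          norm_num
        rw [hstep]
        rw [ih matrix (row ++ [c.toString])]
        rw [specF]
        simp only [hk', if_neg, if_false, hr]
  termination_by cs => cs

-- padding with the row's own last element = padding with the fixed char c, when c IS the last element
lemma padB_eq_padWhileA (key : Int) :
    ∀ (n : Nat) (row : List String) (c : String),
      (key - row.length).toNat ≤ n → row.getLastD "" = c →
      padB row key = padWhileA row key c := by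
  intro n
  induction n with
  | zero =>
    intro row c hle hlast
    have h : ¬ ((row.length : Int) < key) := by omega
    rw [padB, padWhileA, dif_neg h, dif_neg h]
  | succ m ih =>
    intro row c hle hlast
    by_cases h : (row.length : Int) < key
    · rw [padB, padWhileA, dif_pos h, dif_pos h, hlast]
      exact ih (row ++ [c]) c (by simp; omega) (by simp)
    · rw [padB, padWhileA, dif_neg h, dif_neg h]

lemma specF_small (key : Int) :
    ∀ (cs : List Char) (row : List String) (h : cs ≠ []),
      ((row.length : Int) + cs.length ≤ key) →
      specF row cs key = [padWhileA (row ++ cs.map (fun c => c.toString)) key ((cs.getLast h).toString)] := by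
  intro cs
  induction cs with
  | nil => intro row h; exact absurd rfl h
  | cons c rest ih =>
    intro row _ hle
    rw [specF]
    by_cases hr : rest = []
    · subst hr
      by_cases hk : ((row ++ [c.toString]).length : Int) = key
      · simp only [hk, if_pos]
        simp [specF]
        rw [padWhileA, dif_neg (by simp at hk ⊢; omega)]
      · simp only [hk, if_neg, if_false, if_pos rfl]
        simp
    · have hk : ¬ (((row ++ [c.toString]).length : Int) = key) := by
        simp only [List.length_cons] at hle
        have : 1 ≤ rest.length := List.length_pos_iff.mpr hr
        simp; omega
      simp only [hk, if_neg, if_false, hr]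
      have := ih (row ++ [c.toString]) hr (by simp only [List.length_cons] at hle; simp; omega)
      rw [this]
      simp [List.getLast_cons hr]

lemma specF_fill (key : Int) :
    ∀ (cs : List Char) (row : List String),
      ((row.length : Int) < key) → (key < (row.length : Int) + cs.length) →
      specF row cs key =
        (row ++ (cs.take (key.toNat - row.length)).map (fun c => c.toString)) ::
          specF [] (cs.drop (key.toNat - row.length)) key := by
  intro cs
  induction cs with
  | nil => intro row h1 h2; simp at h2; omega
  | cons c rest ih =>
    intro row h1 h2
    rw [specF]
    by_cases hk : ((row ++ [c.toString]).length : Int) = key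
    · simp only [hk, if_pos]
      have hm : key.toNat - row.length = 1 := by simp at hk; omega
      simp [hm]
    · have hlt : ((row ++ [c.toString]).length : Int) < key := by
        simp at hk ⊢; omega
      have hr : rest ≠ [] := by
        intro h; subst h; simp at h2; simp at hlt; omega
      simp only [hk, if_neg, if_false, hr]
      have := ih (row ++ [c.toString]) hlt (by simp at h2 ⊢; omega)
      rw [this]
      have hm : key.toNat - row.length = (key.toNat - (row.length + 1)) + 1 := by
        simp at hlt; omega
      rw [hm]
      simp [List.take_succ_cons, List.drop_succ_cons]

lemma chunkB_nil (key : Int) (fuel : Nat) : chunkB fuel [] key = [] := by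
  cases fuel <;> simp [chunkB]

lemma chunkB_ne_nil (key : Int) (fuel : Nat) (rest : List String) (h : rest ≠ []) :
    chunkB (fuel + 1) rest key ≠ [] := by
  simp [chunkB, h]

lemma slice_to' {α : Type} (xs : List α) (b : Int) (hb : 0 ≤ b) :
    PySem.List.slice xs none (some b) = xs.take b.toNat := by
  first
    | exact PySem.List.slice_to xs b hb
    | exact PySem.List.slice_to xs hb
    | exact PySem.List.slice_to hb
    | exact PySem.List.slice_to xs b
    | rw [PySem.List.slice_to]
    | (simp [PySem.List.slice, PySem.List.clampIdx]; omega)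

lemma slice_from' {α : Type} (xs : List α) (a : Int) (ha : 0 ≤ a) :
    PySem.List.slice xs (some a) none = xs.drop a.toNat := by
  first
    | exact PySem.List.slice_from xs a ha
    | exact PySem.List.slice_from xs ha
    | exact PySem.List.slice_from ha
    | exact PySem.List.slice_from xs a
    | rw [PySem.List.slice_from]
    | (simp [PySem.List.slice, PySem.List.clampIdx]; omega)

-- assembly of B's result from a chunk list
def padLastB (m : List (List String)) (key : Int) : List (List String) :=
  match m.getLast? with
  | none => m
  | some last => m.dropLast ++ [padB last key]

lemma padLastB_single (key : Int) (x : List String) : padLastB [x] key = [padB x key] := by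
  unfold padLastB; simp

lemma padLastB_cons (key : Int) (x : List String) (m : List (List String)) (h : m ≠ []) :
    padLastB (x :: m) key = x :: padLastB m key := by
  cases m with
  | nil => exact absurd rfl h
  | cons y ys =>
    unfold padLastB
    rw [List.getLast?_cons_cons]
    cases hm : (y :: ys).getLast? with
    | none => simp [List.getLast?_eq_none_iff] at hm
    | some last =>
      simp [hm, List.dropLast_cons_of_ne_nil (List.cons_ne_nil y ys)]

lemma specF_eq_B (key : Int) (hkey : 1 ≤ key) :
    ∀ (n : Nat) (fuel : Nat) (cs : List Char), cs.length ≤ n → cs.length ≤ fuel →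
      specF [] cs key = padLastB (chunkB fuel (cs.map (fun c => c.toString)) key) key := by
  intro n
  induction n with
  | zero =>
    intro fuel cs h1 _
    have : cs = [] := List.length_eq_zero_iff.mp (Nat.le_zero.mp h1)
    subst this
    simp [chunkB_nil, specF, padLastB]
  | succ n ih =>
    intro fuel cs h1 h2
    by_cases hcs : cs = []
    · subst hcs; simp [chunkB_nil, specF, padLastB]
    · have hpos : 1 ≤ cs.length := List.length_pos_iff.mpr hcs
      obtain ⟨f, rfl⟩ : ∃ f, fuel = f + 1 := ⟨fuel - 1, by omega⟩
      have hmne : cs.map (fun c => c.toString) ≠ [] := by simp [hcs]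
      rw [chunkB]
      simp only [hmne, if_neg, if_false]
      rw [PySem.List.slice_zero_start, slice_to' _ _ (by omega), slice_from' _ _ (by omega)]
      by_cases hsmall : (cs.length : Int) ≤ key
      · have htake : (cs.map (fun c => c.toString)).take key.toNat = cs.map (fun c => c.toString) := by
          apply List.take_of_length_le; simp; omega
        have hdrop : (cs.map (fun c => c.toString)).drop key.toNat = [] := by
          apply List.drop_eq_nil_of_le; simp; omega
        rw [htake, hdrop, chunkB_nil]
        rw [specF_small key cs [] hcs (by simpa using hsmall)]
        have hlast : (cs.map (fun c => c.toString)).getLastD "" = (cs.getLast hcs).toString := by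
          rw [List.getLastD_eq_getLast?, List.getLast?_map, List.getLast?_eq_some_getLast hcs]
          simp
        have hpadeq : padB (cs.map (fun c => c.toString)) key
            = padWhileA (cs.map (fun c => c.toString)) key ((cs.getLast hcs).toString) :=
          padB_eq_padWhileA key _ _ _ (le_refl _) hlast
        rw [padLastB_single, hpadeq]
        simp
      · have hfill := specF_fill key cs [] (by simp; omega) (by simp; omega)
        simp only [List.nil_append, Nat.sub_zero, List.length_nil] at hfill
        rw [hfill]
        have hdne : (cs.drop key.toNat) ≠ [] := by
          intro h
          have := List.drop_eq_nil_iff.mp h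
          omega
        have hdne' : (cs.map (fun c => c.toString)).drop key.toNat ≠ [] := by
          intro h
          rw [← List.map_drop] at h
          exact hdne (List.map_eq_nil_iff.mp h)
        obtain ⟨g, rfl⟩ : ∃ g, f = g + 1 := by
          refine ⟨f - 1, ?_⟩
          have : 1 ≤ (cs.drop key.toNat).length := List.length_pos_iff.mpr hdne
          simp at this; omega
        rw [padLastB_cons key _ _ (chunkB_ne_nil key g _ hdne')]
        congr 1
        · rw [← List.map_take]
        · rw [← List.map_drop]
          exact ih (g + 1) (cs.drop key.toNat) (by simp; omega) (by simp; omega)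

-- ===== VERDICT (by name: the statement is the Claim_ definition above) =====
theorem StrToMatrix_FILE_spec : Claim_equal_StrToMatrix_FILE := by
  intro text key _hdom hpre
  unfold Spec_StrToMatrix_FILE
  rcases hpre with hempty | hkey
  · subst hempty
    simp [StrToMatrix_FILE, StrToMatrix_FILE_alt, chunkB, padLastB]
  · unfold StrToMatrix_FILE StrToMatrix_FILE_alt
    have hA := foldA_eq_specF key text.toList [] []
    simp only [List.length_nil, Nat.cast_zero, List.nil_append] at hA
    rw [hA]
    have hB := specF_eq_B key hkey text.toList.length text.toList.length text.toList
      (le_refl _) (by simp)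
    rw [hB]
    simp [padLastB]
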